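-- pv_equiv track=rewrite | github.com/kagisearch/quickmark | python/quickmark/postprocess.py | normalize_codeblocks
-- ===== SOURCE A (Python) =====
-- import textwrap
--
-- def normalize_codeblocks(text: str) -> str:
--     """
--     Dedent codeblocks. This also handles cases where opening and closing fences are indented on different levels, as opposed to simply using `textwrap.dedent() on entire block.`
--     """
--     output = []
--     buffer = []
--     in_block = False
--
--     for line in text.split("\n"):
--         stripped = line.lstrip()
--         if not in_block and stripped.startswith("```"):
--             in_block = True
--             buffer.append(stripped)
--         elif in_block:
--             if stripped == "```":
--                 in_block = False
--                 content = textwrap.dedent("\n".join(buffer[1:]))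
--                 output.extend([buffer[0], *content.splitlines(), stripped])
--                 buffer.clear()
--             else:
--                 buffer.append(line)
--         else:
--             output.append(line)
--
--     if in_block and buffer:
--         output.extend(buffer)
--
--     return "\n".join(output)
-- ===== SOURCE B (Python) =====
-- import textwrap
--
-- def normalize_codeblocks(text: str) -> str:
--     raw = text.split("\n")
--     n = len(raw)
--     out = []
--     i = 0
--     while i < n:
--         line = raw[i]
--         stripped = line.lstrip()
--         if stripped.startswith("```"):
--             j = i + 1
--             while j < n and raw[j].lstrip() != "```":
--                 j += 1
--             if j < n:
--                 out.append(stripped)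
--                 out.extend(textwrap.dedent("\n".join(raw[i + 1:j])).splitlines())
--                 out.append("```")
--                 i = j + 1
--             else:
--                 out.append(stripped)
--                 out.extend(raw[i + 1:])
--                 break
--         else:
--             out.append(line)
--             i += 1
--     return "\n".join(out)
-- ===== Notes on version B (the rewrite author's own statement) =====
-- stated objective: alternative
-- what changed: Replaces A's single-pass state machine (in_block flag with a growing buffer list that is flushed on the closing fence) by an index-driven while loop that, at each opening fence, scans forward for the matching exact triple-backtick fence line and emits the whole dedented block (or the raw tail if unterminated) in one step.
import Mathlib
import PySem

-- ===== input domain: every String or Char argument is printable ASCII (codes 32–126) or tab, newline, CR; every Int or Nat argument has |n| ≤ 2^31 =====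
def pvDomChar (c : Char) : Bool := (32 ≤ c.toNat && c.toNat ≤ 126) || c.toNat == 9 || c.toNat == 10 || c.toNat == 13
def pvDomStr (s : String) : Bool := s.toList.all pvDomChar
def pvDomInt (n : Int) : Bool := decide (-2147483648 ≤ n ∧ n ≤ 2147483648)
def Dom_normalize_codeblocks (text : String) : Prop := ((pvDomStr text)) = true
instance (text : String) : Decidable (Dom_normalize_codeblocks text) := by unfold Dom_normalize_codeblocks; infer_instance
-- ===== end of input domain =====

-- B replaces A's streaming state machine (in_block flag + growing buffer) by an index
-- walk that scans forward for the closing fence and emits each block in one step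
-- (same cost; objective: alternative decomposition).

-- ===== shared library helper: textwrap.dedent (CPython 3.11 semantics), called by both Pythons =====
def pyWsOnly (l : List Char) : Bool := !l.isEmpty && l.all (fun c => c == ' ' || c == '\t')
def pyIndentOf (l : List Char) : List Char := l.takeWhile (fun c => c == ' ' || c == '\t')
-- the margin fold of textwrap.dedent (longest common prefix of the indents, computed as CPython does)
def pyMarginStep (m : Option (List Char)) (ind : List Char) : Option (List Char) :=
  match m with
  | none => some ind
  | some mg =>
    if PySem.Chars.startswith ind mg then some mg
    else if PySem.Chars.startswith mg ind then some ind
    else some (((mg.zip ind).takeWhile (fun p => p.1 == p.2)).map Prod.fst)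
def pyDedent (cs : List Char) : List Char :=
  let lines := PySem.Chars.splitOn cs ['\n']
  -- _whitespace_only_re.sub('', text): blank (space/tab-only, nonempty) lines become empty
  let norm := lines.map (fun l => if pyWsOnly l then [] else l)
  -- _leading_whitespace_re.findall: the [ \t]* indent of every line that has a non-[ \t] char
  let indents := (norm.filter (fun l => (pyIndentOf l).length < l.length)).map pyIndentOf
  let margin := (indents.foldl pyMarginStep none).getD []
  if margin.isEmpty then PySem.Chars.join ['\n'] norm
  else PySem.Chars.join ['\n']
    (norm.map (fun l => if PySem.Chars.startswith l margin then l.drop margin.length else l))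

-- ===== PORT A =====
-- the 'for line in text.split("\n")' loop, state (output, buffer, in_block); the trailing
-- 'if in_block and buffer' flush is the [] case
def aLoop : List (List Char) → List (List Char) → List (List Char) → Bool → List (List Char)
  | [], output, buffer, in_block => if in_block && !buffer.isEmpty then output ++ buffer else output
  | line :: rest, output, buffer, in_block =>
    let stripped := PySem.Chars.lstrip line
    if !in_block && PySem.Chars.startswith stripped ['`','`','`'] then
      aLoop rest output (buffer ++ [stripped]) true
    else if in_block then
      if stripped == ['`','`','`'] then
        let content := pyDedent (PySem.Chars.join ['\n'] buffer.tail)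
        aLoop rest (output ++ buffer.headD [] :: (PySem.Chars.splitlines content ++ [stripped])) [] false
      else aLoop rest output (buffer ++ [line]) true
    else aLoop rest (output ++ [line]) buffer in_block

def normalize_codeblocks (text : String) : String :=
  String.ofList (PySem.Chars.join ['\n'] (aLoop (PySem.Chars.splitOn text.toList ['\n']) [] [] false))

-- ===== PORT B =====
-- textwrap.dedent("\n".join(xs)).splitlines()
def bBody (xs : List (List Char)) : List (List Char) :=
  PySem.Chars.splitlines (pyDedent (PySem.Chars.join ['\n'] xs))
-- Source B's while loop over the index i; the slices raw[i+1:j] / raw[i+1:] are take/drop of the tail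
def bLoop : List (List Char) → List (List Char)
  | [] => []
  | line :: rest =>
    let stripped := PySem.Chars.lstrip line
    if PySem.Chars.startswith stripped ['`','`','`'] then
      match rest.findIdx? (fun x => PySem.Chars.lstrip x == ['`','`','`']) with
      | some j => stripped :: (bBody (rest.take j) ++ ['`','`','`'] :: bLoop (rest.drop (j + 1)))
      | none => stripped :: rest
    else line :: bLoop rest
termination_by lines => lines.length
decreasing_by
  · simp only [List.length_cons, List.length_drop]; omega
  · simp

def normalize_codeblocks_alt (text : String) : String :=
  String.ofList (PySem.Chars.join ['\n'] (bLoop (PySem.Chars.splitOn text.toList ['\n'])))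

-- ===== PRECONDITION & SPEC =====
def Spec_normalize_codeblocks (text : String) (out : String) : Prop := out = normalize_codeblocks_alt text
instance (text : String) (out : String) : Decidable (Spec_normalize_codeblocks text out) := by unfold Spec_normalize_codeblocks; infer_instance

-- ===== CLAIM (what is proved, stated in full; the proofs are below) =====
def Claim_equal_normalize_codeblocks : Prop := ∀ (text : String), Dom_normalize_codeblocks text → Spec_normalize_codeblocks text (normalize_codeblocks text)

-- ===== LEMMAS AND PROOFS =====

-- what bLoop produces once a block has been opened with stripped fence `fence` and the raw
-- body lines seen so far are `pre` (A's buffer = fence :: pre)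
def contB (fence : List Char) (pre lines : List (List Char)) : List (List Char) :=
  match lines.findIdx? (fun x => PySem.Chars.lstrip x == ['`','`','`']) with
  | some j => fence :: (bBody (pre ++ lines.take j) ++ ['`','`','`'] :: bLoop (lines.drop (j + 1)))
  | none => fence :: (pre ++ lines)

lemma loop_eq (n : Nat) : ∀ (lines : List (List Char)), lines.length ≤ n →
    (∀ out, aLoop lines out [] false = out ++ bLoop lines) ∧
    (∀ out fence pre, aLoop lines out (fence :: pre) true = out ++ contB fence pre lines) := by
  induction n with
  | zero =>
    intro lines hlen
    have h0 : lines = [] := List.eq_nil_of_length_eq_zero (Nat.le_zero.mp hlen)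
    subst h0
    exact ⟨fun out => by simp [aLoop, bLoop],
           fun out fence pre => by simp [aLoop, contB, List.findIdx?_nil]⟩
  | succ n ih =>
    intro lines hlen
    cases lines with
    | nil =>
      exact ⟨fun out => by simp [aLoop, bLoop],
             fun out fence pre => by simp [aLoop, contB, List.findIdx?_nil]⟩
    | cons l rest =>
      have hr : rest.length ≤ n := by simpa [Nat.succ_le_succ_iff] using hlen
      constructor
      · intro out
        by_cases hs : PySem.Chars.startswith (PySem.Chars.lstrip l) ['`','`','`'] = true
        · simp only [aLoop, hs, Bool.not_false, Bool.true_and, if_true, List.nil_append]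
          rw [(ih rest hr).2 out (PySem.Chars.lstrip l) []]
          rw [bLoop]
          simp only [hs, if_true]
          cases hfi : rest.findIdx? (fun x => PySem.Chars.lstrip x == ['`','`','`']) with
          | some j => simp [contB, hfi]
          | none => simp [contB, hfi]
        · simp only [aLoop, hs, Bool.not_false, Bool.true_and]
          rw [(ih rest hr).1 (out ++ [l])]
          rw [bLoop]
          simp [hs]
      · intro out fence pre
        by_cases hc : (PySem.Chars.lstrip l == ['`','`','`']) = true
        · have heq : PySem.Chars.lstrip l = ['`','`','`'] := by simpa using hc
          simp only [aLoop, Bool.not_true, Bool.false_and, Bool.false_eq_true, if_false, if_true,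
            hc, List.headD_cons, List.tail_cons]
          rw [(ih rest hr).1]
          simp only [contB, List.findIdx?_cons, List.drop_succ_cons, heq, bBody]
          simp
        · simp only [aLoop, Bool.not_true, Bool.false_and, Bool.false_eq_true, hc]
          have hb : (fence :: pre) ++ [l] = fence :: (pre ++ [l]) := rfl
          rw [hb, (ih rest hr).2 out fence (pre ++ [l])]
          simp only [contB, List.findIdx?_cons, hc]
          cases hfi : rest.findIdx? (fun x => PySem.Chars.lstrip x == ['`','`','`']) with
          | some j => simp [List.drop_succ_cons]
          | none => simp

-- ===== VERDICT (by name: the statement is the Claim_ definition above) =====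
theorem normalize_codeblocks_spec : Claim_equal_normalize_codeblocks := by
  intro text _
  unfold Spec_normalize_codeblocks normalize_codeblocks normalize_codeblocks_alt
  rw [(loop_eq (PySem.Chars.splitOn text.toList ['\n']).length _ (le_refl _)).1]
  simp
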